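-- pv_equiv track=rewrite | github.com/niclammm/Advent-Code-2024 | Day 9/Part2/DayNine.py | find_leftmost_span
-- ===== SOURCE A (Python) =====
-- def find_leftmost_span(blocks, file_length):
--     """Finds the leftmost span of free space that can fit a file."""
--     n = len(blocks)
--     free_start = -1
--     free_count = 0
--
--     for i in range(n):
--         if blocks[i] == '.':
--             if free_start == -1:
--                 free_start = i
--             free_count += 1
--             if free_count == file_length:
--                 return free_start
--         else:
--             free_start = -1
--             free_count = 0
--
--     return -1  # No valid span found
-- ===== SOURCE B (Python) =====
-- def find_leftmost_span(blocks, file_length):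
--     """Finds the leftmost span of free space that can fit a file."""
--     n = len(blocks)
--     idx = 0
--     while idx < n:
--         j = idx
--         while j < n and blocks[j] == blocks[idx]:
--             j += 1
--         if blocks[idx] == '.' and file_length > 0 and j - idx >= file_length:
--             return idx
--         idx = j
--     return -1
-- ===== Notes on version B (the rewrite author's own statement) =====
-- stated objective: alternative
-- what changed: Replaced the incremental free_start/free_count state machine by a two-pointer run scan: each maximal run of equal blocks is measured at once and a '.' run is accepted iff its length reaches file_length (guarding file_length > 0).
import Mathlib
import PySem

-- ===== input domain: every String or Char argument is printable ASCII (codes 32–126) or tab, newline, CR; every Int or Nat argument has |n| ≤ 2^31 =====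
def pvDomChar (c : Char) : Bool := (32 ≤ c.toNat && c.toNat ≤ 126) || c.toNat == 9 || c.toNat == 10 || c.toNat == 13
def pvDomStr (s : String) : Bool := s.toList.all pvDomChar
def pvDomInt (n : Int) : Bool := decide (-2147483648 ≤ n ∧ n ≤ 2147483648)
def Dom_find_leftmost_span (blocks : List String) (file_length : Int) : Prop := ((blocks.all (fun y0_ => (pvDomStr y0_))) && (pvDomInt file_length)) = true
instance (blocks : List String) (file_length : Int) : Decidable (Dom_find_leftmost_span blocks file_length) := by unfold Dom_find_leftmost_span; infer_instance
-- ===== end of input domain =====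

-- B replaces A's incremental free_start/free_count state machine by a two-pointer
-- scan over maximal runs of equal blocks (objective: alternative, same cost).

-- ===== PORT A =====
-- A's for-loop over i with state (free_start, free_count), as structural
-- recursion over the remaining list carrying the current index i.
def flsGoA (fl : Int) : List String → Int → Int → Int → Int
  | [], _, _, _ => -1
  | b :: t, i, fs, fc =>
    if b = "." then
      let fs' := if fs = -1 then i else fs
      let fc' := fc + 1
      if fc' = fl then fs' else flsGoA fl t (i + 1) fs' fc'
    else
      flsGoA fl t (i + 1) (-1) 0

def find_leftmost_span (blocks : List String) (file_length : Int) : Int :=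
  flsGoA file_length blocks 0 (-1) 0

-- ===== PORT B =====
-- B's outer while-loop; the inner `while j < n and blocks[j] == blocks[idx]`
-- that measures the current run is the takeWhile/dropWhile split of the tail.
def flsGoB (fl : Int) : List String → Int → Int
  | [], _ => -1
  | b :: t, idx =>
    let run := t.takeWhile (· = b)
    let len : Int := 1 + run.length
    if b = "." ∧ 0 < fl ∧ fl ≤ len then idx
    else flsGoB fl (t.dropWhile (· = b)) (idx + len)
termination_by l => l.length
decreasing_by
  exact Nat.lt_succ_of_le (List.length_dropWhile_le _ _)

def find_leftmost_span_alt (blocks : List String) (file_length : Int) : Int :=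
  flsGoB file_length blocks 0

-- ===== PRECONDITION & SPEC =====
def Spec_find_leftmost_span (blocks : List String) (file_length : Int) (out : Int) : Prop := out = find_leftmost_span_alt blocks file_length
instance (blocks : List String) (file_length : Int) (out : Int) : Decidable (Spec_find_leftmost_span blocks file_length out) := by unfold Spec_find_leftmost_span; infer_instance

-- ===== CLAIM (what is proved, stated in full; the proofs are below) =====
def Claim_equal_find_leftmost_span : Prop := ∀ (blocks : List String) (file_length : Int), Dom_find_leftmost_span blocks file_length → Spec_find_leftmost_span blocks file_length (find_leftmost_span blocks file_length)

-- ===== LEMMAS AND PROOFS =====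

-- If the list is empty or does not start with ".", A's loop ignores the carried
-- (free_start, free_count) state: both are reset before they are ever read.
theorem flsGoA_reset (fl : Int) (l : List String)
    (hl : ∀ x ∈ l.head?, x ≠ ".") (i fs fc : Int) :
    flsGoA fl l i fs fc = flsGoA fl l i (-1) 0 := by
  cases l with
  | nil => rfl
  | cons b t =>
    have hb : b ≠ "." := hl b (by simp)
    simp [flsGoA, hb]

-- A's loop steps through a run of equal non-"." blocks without changing anything
-- but the index.
theorem flsGoA_skip (fl : Int) (b : String) (hb : b ≠ ".") :
    ∀ (d : List String), (∀ x ∈ d, x = b) → ∀ (r : List String) (i : Int),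
      flsGoA fl (d ++ r) i (-1) 0 = flsGoA fl r (i + d.length) (-1) 0 := by
  intro d
  induction d with
  | nil => intro _ r i; simp
  | cons x d' ih =>
    intro hd r i
    have hx : x = b := hd x (by simp)
    have hd' : ∀ y ∈ d', y = b := fun y hy => hd y (by simp [hy])
    have hxd : x ≠ "." := by rw [hx]; exact hb
    simp only [List.cons_append, flsGoA, if_neg hxd]
    rw [ih hd' r (i + 1)]
    congr 1
    simp only [List.length_cons]
    push_cast
    ring

-- A's loop across a run of d.length further "." blocks, with a run already
-- started (fs ≠ -1, fc blocks seen): it returns fs iff the target fl is hit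
-- strictly inside fc < fl ≤ fc + d.length, else continues on r with reset state.
theorem flsGoA_dots (fl : Int) :
    ∀ (d : List String), (∀ x ∈ d, x = ".") →
    ∀ (r : List String), (∀ x ∈ r.head?, x ≠ ".") →
    ∀ (i fs fc : Int), fs ≠ -1 →
      flsGoA fl (d ++ r) i fs fc =
        if fc < fl ∧ fl ≤ fc + d.length then fs
        else flsGoA fl r (i + d.length) (-1) 0 := by
  intro d
  induction d with
  | nil =>
    intro _ r hr i fs fc _
    rw [if_neg (by simp only [List.length_nil, Nat.cast_zero, add_zero]; omega)]
    simpa using flsGoA_reset fl r hr i fs fc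
  | cons x d' ih =>
    intro hd r hr i fs fc hfs
    have hx : x = "." := hd x (by simp)
    have hd' : ∀ y ∈ d', y = "." := fun y hy => hd y (by simp [hy])
    simp only [List.cons_append, flsGoA, if_pos hx, if_neg hfs]
    by_cases hfl : fc + 1 = fl
    · rw [if_pos hfl, if_pos (show fc < fl ∧ fl ≤ fc + (((x :: d').length : Nat) : Int) by
        simp only [List.length_cons]; push_cast; omega)]
    · rw [if_neg hfl, ih hd' r hr (i + 1) fs (fc + 1) hfs]
      by_cases hc : fc + 1 < fl ∧ fl ≤ fc + 1 + (d'.length : Int)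
      · rw [if_pos hc, if_pos (by simp only [List.length_cons]; push_cast; omega)]
      · rw [if_neg hc, if_neg (by simp only [List.length_cons]; push_cast; omega)]
        congr 1
        simp only [List.length_cons]
        push_cast
        ring

-- elements of takeWhile (· = b) equal b
theorem mem_takeWhile_eq (b : String) (t : List String) :
    ∀ x ∈ t.takeWhile (· = b), x = b := by
  intro x hx
  have := List.all_takeWhile (p := (· = b)) (l := t)
  rw [List.all_eq_true] at this
  simpa using this x hx

-- the head of dropWhile (· = b) is not b
theorem head_dropWhile_ne (b : String) (t : List String) :
    ∀ x ∈ (t.dropWhile (· = b)).head?, x ≠ b := by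
  intro x hx
  have h := List.head?_dropWhile_not (· = b) t
  cases hh : (t.dropWhile (· = b)).head? with
  | none => rw [hh] at hx; simp at hx
  | some y =>
    rw [hh] at h hx
    simp only [Option.mem_def, Option.some.injEq] at hx
    subst hx
    simpa using h

-- Main equivalence of the two loops, by strong induction on the list length.
theorem flsGo_eq (fl : Int) :
    ∀ (n : Nat) (l : List String), l.length ≤ n → ∀ (idx : Int), 0 ≤ idx →
      flsGoA fl l idx (-1) 0 = flsGoB fl l idx := by
  intro n
  induction n with
  | zero =>
    intro l hl idx _
    cases l with
    | nil => simp [flsGoA, flsGoB]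
    | cons b t => simp at hl
  | succ n ih =>
    intro l hl idx hidx
    cases l with
    | nil => simp [flsGoA, flsGoB]
    | cons b t =>
      have hsplit : t.takeWhile (· = b) ++ t.dropWhile (· = b) = t :=
        List.takeWhile_append_dropWhile
      have hrlen : (t.dropWhile (· = b)).length ≤ n := by
        have h1 := List.length_dropWhile_le (· = b) t
        have h2 : t.length + 1 ≤ n + 1 := by simpa using hl
        omega
      have htw : (0 : Int) ≤ ((t.takeWhile (· = b)).length : Int) := by positivity
      by_cases hb : b = "."
      · subst hb
        have hdots : ∀ x ∈ t.takeWhile (· = ("." : String)), x = "." :=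
          mem_takeWhile_eq _ t
        have hhead' : ∀ x ∈ (t.dropWhile (· = ("." : String))).head?, x ≠ "." :=
          head_dropWhile_ne _ t
        simp only [flsGoA, flsGoB, if_true, true_and]
        conv_lhs => rw [← hsplit]
        by_cases h1 : (0 : Int) + 1 = fl
        · rw [if_pos h1, if_pos (by constructor <;> omega)]
        · rw [if_neg h1,
            flsGoA_dots fl _ hdots _ hhead' (idx + 1) idx (0 + 1) (by omega)]
          by_cases hc : (0 : Int) + 1 < fl ∧
              fl ≤ 0 + 1 + ((t.takeWhile (· = ("." : String))).length : Int)
          · rw [if_pos hc, if_pos (by constructor <;> omega)]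
          · rw [if_neg hc, if_neg (by omega)]
            rw [ih _ hrlen _ (by omega)]
            congr 1
            ring
      · have heq : ∀ x ∈ t.takeWhile (· = b), x = b := mem_takeWhile_eq b t
        have hhead' : ∀ x ∈ (t.dropWhile (· = b)).head?, x ≠ b :=
          head_dropWhile_ne b t
        simp only [flsGoB]
        rw [if_neg (by intro h; exact hb h.1)]
        simp only [flsGoA, if_neg hb]
        conv_lhs => rw [← hsplit]
        rw [flsGoA_skip fl b hb _ heq _ (idx + 1), ih _ hrlen _ (by omega)]
        congr 1
        ring

-- ===== VERDICT (by name: the statement is the Claim_ definition above) =====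
theorem find_leftmost_span_spec : Claim_equal_find_leftmost_span := by
  intro blocks file_length _
  unfold Spec_find_leftmost_span find_leftmost_span find_leftmost_span_alt
  exact flsGo_eq file_length blocks.length blocks le_rfl 0 le_rfl
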